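-- pv_equiv track=rewrite | github.com/RostikRK/UCU | BasicsOfProgramming/FirstTerm/Lab7/graph.py | to_edge_dict
-- ===== SOURCE A (Python) =====
-- def to_edge_dict(edge_list):
--     """
--     (list) -> (dict)
--     Convert a graph from list of edges to dictionary of vertices.
--
--     >>> to_edge_dict([[1, 2], [3, 4], [1, 5], [2, 4]])
--     {1: [2, 5], 2: [1, 4], 3: [4], 4: [2, 3], 5: [1]}
--     """
--     edgedic = {}
--     edgeset = set()
--     for en in edge_list:
--         for jey in en:
--             edgeset.add(jey)
--     arclist = list(edgeset)
--     for j in arclist: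
--         nonlist =[]
--         for i in edge_list:
--             if i[0] == j:
--                 nonlist.append(i[1])
--             elif i[1] == j:
--                 nonlist.append(i[0])
--         edgedic[j] = nonlist
--     return edgedic
-- ===== SOURCE B (Python) =====
-- def to_edge_dict(edge_list):
--     adj = {}
--     for edge in edge_list:
--         for v in edge:
--             adj.setdefault(v, [])
--     for edge in edge_list:
--         a, b = edge[0], edge[1]
--         adj[a].append(b)
--         if a != b:
--             adj[b].append(a)
--     return adj
-- ===== Notes on version B (the rewrite author's own statement) =====
-- stated objective: faster
-- what changed: B replaces A's per-vertex rescan of the whole edge list (for each vertex, scan every edge) with a single pass that seeds every vertex's key once and then appends both endpoints of each edge directly, handling self-loops with one append.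
-- outside the precondition, e.g. on to_edge_dict([[]]): A returns {}, B raises IndexError
import Mathlib
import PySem

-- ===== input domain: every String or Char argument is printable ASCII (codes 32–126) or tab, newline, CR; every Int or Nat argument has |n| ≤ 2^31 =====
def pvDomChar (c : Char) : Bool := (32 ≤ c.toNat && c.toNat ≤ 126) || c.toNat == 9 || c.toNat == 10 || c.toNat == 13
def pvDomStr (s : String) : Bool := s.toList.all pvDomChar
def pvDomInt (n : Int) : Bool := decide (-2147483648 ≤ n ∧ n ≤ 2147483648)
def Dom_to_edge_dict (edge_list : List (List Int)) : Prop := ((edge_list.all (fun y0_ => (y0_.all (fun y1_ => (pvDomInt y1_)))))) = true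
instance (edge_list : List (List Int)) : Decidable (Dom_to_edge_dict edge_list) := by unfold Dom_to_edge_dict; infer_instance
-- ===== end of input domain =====

-- B replaces A's per-vertex rescan of every edge with a single pass appending both endpoints
-- of each edge (self-loop appended once); same return value, keys as a set, per-key lists identical.

-- ===== PORT A =====
-- list(edgeset): the Python iterates the set in hash order; only the resulting dict's KEY order
-- depends on it (each value list is computed from edge_list alone), and dict outputs are compared
-- ignoring order, so the Set's first-insertion order stands in for the hash order here.
def to_edge_dict (edge_list : List (List Int)) : List (Int × List Int) :=
  let edgeset : PySem.Set Int :=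
    edge_list.foldl (fun s en => en.foldl (fun s jey => PySem.Set.add s jey) s) PySem.Set.empty
  let arclist : List Int := edgeset
  let edgedic := arclist.foldl (fun d j =>
      let nonlist := edge_list.foldl (fun nl i =>
        if (PySem.List.pyGet? i 0).getD 0 = j then nl ++ [(PySem.List.pyGet? i 1).getD 0]
        else if (PySem.List.pyGet? i 1).getD 0 = j then nl ++ [(PySem.List.pyGet? i 0).getD 0]
        else nl) ([] : List Int)
      d.insert j nonlist) (PySem.Dict.empty : PySem.Dict Int (List Int))
  edgedic.items

-- ===== PORT B =====
def to_edge_dict_alt (edge_list : List (List Int)) : List (Int × List Int) :=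
  let adj := edge_list.foldl (fun d edge => edge.foldl (fun d v => d.setdefault v []) d)
      (PySem.Dict.empty : PySem.Dict Int (List Int))
  let adj2 := edge_list.foldl (fun d edge =>
      let a := (PySem.List.pyGet? edge 0).getD 0
      let b := (PySem.List.pyGet? edge 1).getD 0
      let d1 := d.modify a [] (fun l => l ++ [b])
      if a ≠ b then d1.modify b [] (fun l => l ++ [a]) else d1) adj
  adj2.items

-- ===== PRECONDITION & SPEC =====
-- Pre_ excludes lists containing an edge with fewer than two endpoints: A raises IndexError on them
-- whenever any vertex exists, and on lists of only empty edges (where A returns {}) B's own indexing raises.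
def Pre_to_edge_dict (edge_list : List (List Int)) : Prop := ∀ e ∈ edge_list, 2 ≤ e.length
instance (edge_list : List (List Int)) : Decidable (Pre_to_edge_dict edge_list) := by unfold Pre_to_edge_dict; infer_instance
def pvWitness_to_edge_dict : List (List Int) := [[1, 2], [3, 4], [1, 5], [2, 4]]

def Spec_to_edge_dict (edge_list : List (List Int)) (out : List (Int × List Int)) : Prop := out = to_edge_dict_alt edge_list
instance (edge_list : List (List Int)) (out : List (Int × List Int)) : Decidable (Spec_to_edge_dict edge_list out) := by unfold Spec_to_edge_dict; infer_instance

-- ===== CLAIM (what is proved, stated in full; the proofs are below) =====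
def Claim_equal_to_edge_dict : Prop := ∀ (edge_list : List (List Int)), Dom_to_edge_dict edge_list → Pre_to_edge_dict edge_list → Spec_to_edge_dict edge_list (to_edge_dict edge_list)

-- ===== LEMMAS AND PROOFS =====

-- the contribution of one edge to vertex j's adjacency list (shared characterisation of both ports)
def pvContrib (i : List Int) (j : Int) : List Int :=
  if (PySem.List.pyGet? i 0).getD 0 = j then [(PySem.List.pyGet? i 1).getD 0]
  else if (PySem.List.pyGet? i 1).getD 0 = j then [(PySem.List.pyGet? i 0).getD 0]
  else []

theorem pyGet?_cons2_zero (a b : Int) (t : List Int) : PySem.List.pyGet? (a::b::t) 0 = some a := by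
  have h0 : (0:Int) ≤ (t.length:Int) + 1 := by positivity
  simp [PySem.List.pyGet?, PySem.List.pyIdx?, h0]

theorem pyGet?_cons2_one (a b : Int) (t : List Int) : PySem.List.pyGet? (a::b::t) 1 = some b := by
  simp [PySem.List.pyGet?, PySem.List.pyIdx?]

-- a nested element-wise fold over a list of lists is the fold over its flatten
theorem foldl_foldl_flatten {α β : Type} (f : β → α → β) (el : List (List α)) (s : β) :
    el.foldl (fun s en => en.foldl f s) s = el.flatten.foldl f s := by
  induction el generalizing s with
  | nil => rfl
  | cons e es ih => simp [List.foldl_append, ih]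

-- A's inner per-vertex scan collects exactly the per-edge contributions
theorem inner_eq_flatMap (j : Int) (el : List (List Int)) :
    el.foldl (fun nl i =>
        if (PySem.List.pyGet? i 0).getD 0 = j then nl ++ [(PySem.List.pyGet? i 1).getD 0]
        else if (PySem.List.pyGet? i 1).getD 0 = j then nl ++ [(PySem.List.pyGet? i 0).getD 0]
        else nl) ([] : List Int) = el.flatMap (fun i => pvContrib i j) := by
  rw [show (fun (nl : List Int) (i : List Int) =>
      if (PySem.List.pyGet? i 0).getD 0 = j then nl ++ [(PySem.List.pyGet? i 1).getD 0]
      else if (PySem.List.pyGet? i 1).getD 0 = j then nl ++ [(PySem.List.pyGet? i 0).getD 0]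
      else nl) = (fun nl i => nl ++ pvContrib i j) from by
    funext nl i; simp only [pvContrib]; split_ifs <;> simp]
  rw [PySem.List.foldl_append_eq_flatMap]; simp

-- B's seeding pass over a list of fresh-or-seen vertices, from a dict of empty lists
theorem seed_pass (xs : List Int) : ∀ (s : List Int), s.Nodup →
    xs.foldl (fun d v => d.setdefault v []) (PySem.Dict.mk (s.map (fun j => (j, ([] : List Int)))))
      = PySem.Dict.mk ((xs.foldl PySem.Set.add s).map (fun j => (j, ([] : List Int)))) := by
  induction xs with
  | nil => intro s _; rfl
  | cons v xs ih =>
    intro s hnd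
    have hkeys : (PySem.Dict.mk (s.map (fun j => (j, ([] : List Int))))).keys = s := by
      simp [PySem.Dict.keys, Function.comp_def]
    have hc : (PySem.Dict.mk (s.map (fun j => (j, ([] : List Int))))).contains v = decide (v ∈ s) := by
      rw [PySem.Dict.contains_eq_decide_mem_keys, hkeys]
    by_cases hv : v ∈ s
    · have : (PySem.Dict.mk (s.map (fun j => (j, ([] : List Int))))).setdefault v [] =
          PySem.Dict.mk (s.map (fun j => (j, ([] : List Int)))) :=
        PySem.Dict.setdefault_of_contains _ _ (by simp [hc, hv])
      have hadd : PySem.Set.add s v = s := by simp [PySem.Set.add, PySem.Set.contains, hv]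
      simp only [List.foldl_cons, this, hadd]
      exact ih s hnd
    · have hset : (PySem.Dict.mk (s.map (fun j => (j, ([] : List Int))))).setdefault v [] =
          PySem.Dict.mk ((s ++ [v]).map (fun j => (j, ([] : List Int)))) := by
        rw [PySem.Dict.setdefault_of_not_contains _ _ (by simp [hc, hv])]
        apply PySem.Dict.ext
        rw [PySem.Dict.items_insert_of_not_contains _ _ (by simp [hc, hv])]
        simp
      have hadd : PySem.Set.add s v = s ++ [v] := by simp [PySem.Set.add, PySem.Set.contains, hv]
      simp only [List.foldl_cons, hset, hadd]
      exact ih (s ++ [v]) (by simp [List.nodup_append, hnd]; exact fun a ha h => hv (h ▸ ha))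

-- modify of a key present in a map-shaped dict rewrites that key's value in place
theorem modify_map (K : List Int) (g : Int → List Int) (k : Int) (f : List Int → List Int)
    (hk : k ∈ K) (hnd : K.Nodup) :
    (PySem.Dict.mk (K.map (fun j => (j, g j)))).modify k [] f
      = PySem.Dict.mk (K.map (fun j => (j, if j = k then f (g j) else g j))) := by
  have hkeys : (PySem.Dict.mk (K.map (fun j => (j, g j)))).keys = K := by
    simp [PySem.Dict.keys, Function.comp_def]
  have hndk : (PySem.Dict.mk (K.map (fun j => (j, g j)))).keys.Nodup := by rw [hkeys]; exact hnd
  have hc : (PySem.Dict.mk (K.map (fun j => (j, g j)))).contains k = true := by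
    rw [PySem.Dict.contains_eq_decide_mem_keys, hkeys]; simpa using hk
  have hget : (PySem.Dict.mk (K.map (fun j => (j, g j)))).getD k [] = g k :=
    PySem.Dict.getD_of_mem_items _ (by simp only [PySem.Dict.items]; exact List.mem_map.mpr ⟨k, hk, rfl⟩) hndk []
  unfold PySem.Dict.modify
  apply PySem.Dict.ext
  rw [hget, PySem.Dict.items_insert_of_contains _ _ hc]
  simp only [List.map_map]
  apply List.map_congr_left
  intro j _
  by_cases hj : j = k <;> simp [hj]

-- B's second pass, from a map-shaped dict, appends each edge's contribution per key
theorem second_pass (es : List (List Int)) (K : List Int) (hnd : K.Nodup) :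
    ∀ (g : Int → List Int), (∀ e ∈ es, 2 ≤ e.length) → (∀ e ∈ es, ∀ x ∈ e, x ∈ K) →
    es.foldl (fun d edge =>
        let a := (PySem.List.pyGet? edge 0).getD 0
        let b := (PySem.List.pyGet? edge 1).getD 0
        let d1 := d.modify a [] (fun l => l ++ [b])
        if a ≠ b then d1.modify b [] (fun l => l ++ [a]) else d1)
      (PySem.Dict.mk (K.map (fun j => (j, g j))))
      = PySem.Dict.mk (K.map (fun j => (j, g j ++ es.flatMap (fun i => pvContrib i j)))) := by
  induction es with
  | nil => intro g _ _; simp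
  | cons e es ih =>
    intro g hlen hmem
    obtain ⟨a, b, t, rfl⟩ : ∃ a b t, e = a :: b :: t := by
      match e, hlen e (by simp) with
      | a :: b :: t, _ => exact ⟨a, b, t, rfl⟩
    have ha : a ∈ K := hmem (a :: b :: t) (by simp) a (by simp)
    have hb : b ∈ K := hmem (a :: b :: t) (by simp) b (by simp)
    have hstep :
        (let aa := (PySem.List.pyGet? (a::b::t) 0).getD 0
         let bb := (PySem.List.pyGet? (a::b::t) 1).getD 0
         let d1 := (PySem.Dict.mk (K.map (fun j => (j, g j)))).modify aa [] (fun l => l ++ [bb])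
         if aa ≠ bb then d1.modify bb [] (fun l => l ++ [aa]) else d1)
        = PySem.Dict.mk (K.map (fun j => (j, g j ++ pvContrib (a::b::t) j))) := by
      simp only [pyGet?_cons2_zero, pyGet?_cons2_one, Option.getD_some]
      by_cases hab : a = b
      · subst hab
        simp only [ne_eq, not_true_eq_false, if_neg, not_not, if_false]
        rw [modify_map K g a _ ha hnd]
        congr 1
        apply List.map_congr_left
        intro j _
        by_cases hj : j = a
        · subst hj; simp [pvContrib, pyGet?_cons2_zero, pyGet?_cons2_one]
        · have h1 : ¬ a = j := fun h => hj h.symm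
          simp [pvContrib, pyGet?_cons2_zero, pyGet?_cons2_one, hj, h1]
      · simp only [ne_eq, hab, not_false_eq_true, if_true]
        rw [modify_map K g a _ ha hnd,
            modify_map K (fun j => if j = a then g j ++ [b] else g j) b _ hb hnd]
        congr 1
        apply List.map_congr_left
        intro j _
        by_cases hja : j = a
        · subst hja
          simp [pvContrib, pyGet?_cons2_zero, pyGet?_cons2_one, hab]
        · by_cases hjb : j = b
          · have hba : ¬ b = a := fun h => hab h.symm
            simp [pvContrib, pyGet?_cons2_zero, pyGet?_cons2_one, hjb, hab, hba]
          · have h1 : ¬ a = j := fun h => hja h.symm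
            have h2 : ¬ b = j := fun h => hjb h.symm
            simp [pvContrib, pyGet?_cons2_zero, pyGet?_cons2_one, hja, hjb, h1, h2]
    simp only [List.foldl_cons]
    rw [hstep, ih (fun j => g j ++ pvContrib (a::b::t) j)
        (fun e he => hlen e (by simp [he])) (fun e he => hmem e (by simp [he]))]
    simp

-- ===== VERDICT (by name: the statement is the Claim_ definition above) =====
theorem to_edge_dict_spec : Claim_equal_to_edge_dict := by
  intro edge_list _hdom hpre
  unfold Spec_to_edge_dict to_edge_dict to_edge_dict_alt
  simp only []
  -- the vertex list, in first-insertion order over the flattened edges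
  set K : List Int := PySem.Set.ofList edge_list.flatten with hK
  have hKnd : K.Nodup := PySem.Set.nodup_ofList _
  have hset : edge_list.foldl (fun s en => en.foldl (fun s jey => PySem.Set.add s jey) s)
      PySem.Set.empty = K := by
    rw [foldl_foldl_flatten]; rfl
  -- A's side: a fold of fresh inserts over K
  have hA : (K.foldl (fun d j =>
      d.insert j (edge_list.foldl (fun nl i =>
        if (PySem.List.pyGet? i 0).getD 0 = j then nl ++ [(PySem.List.pyGet? i 1).getD 0]
        else if (PySem.List.pyGet? i 1).getD 0 = j then nl ++ [(PySem.List.pyGet? i 0).getD 0]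
        else nl) ([] : List Int))) (PySem.Dict.empty : PySem.Dict Int (List Int))).items
      = K.map (fun j => (j, edge_list.flatMap (fun i => pvContrib i j))) := by
    have := PySem.Dict.items_foldl_insert_fresh (l := K) (k := fun j => j)
      (v := fun j => edge_list.flatMap (fun i => pvContrib i j))
      (d := (PySem.Dict.empty : PySem.Dict Int (List Int)))
      (by intro a _; simp) (by simpa using hKnd)
    simp only [PySem.Dict.items] at this ⊢
    rw [show (fun (d : PySem.Dict Int (List Int)) (j : Int) =>
        d.insert j (edge_list.foldl (fun nl i =>
          if (PySem.List.pyGet? i 0).getD 0 = j then nl ++ [(PySem.List.pyGet? i 1).getD 0]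
          else if (PySem.List.pyGet? i 1).getD 0 = j then nl ++ [(PySem.List.pyGet? i 0).getD 0]
          else nl) ([] : List Int)))
        = (fun (d : PySem.Dict Int (List Int)) (j : Int) =>
            d.insert j (edge_list.flatMap (fun i => pvContrib i j))) from by
      funext d j; rw [inner_eq_flatMap]]
    simpa using this
  -- B's side: seeding then the append pass
  have hseed : edge_list.foldl (fun d edge => edge.foldl (fun d v => d.setdefault v []) d)
      (PySem.Dict.empty : PySem.Dict Int (List Int))
      = PySem.Dict.mk (K.map (fun j => (j, ([] : List Int)))) := by
    rw [foldl_foldl_flatten]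
    have := seed_pass edge_list.flatten [] (by simp)
    simpa using this
  have hB := second_pass edge_list K hKnd (fun _ => ([] : List Int)) hpre
    (fun e he x hx => by
      rw [hK]; rw [PySem.Set.mem_ofList]; exact List.mem_flatten.mpr ⟨e, he, hx⟩)
  rw [hset, hseed, hB, hA]
  simp [PySem.Dict.items]
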